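-- pv_equiv track=rewrite | github.com/seemantshankar/spherical | Spherical/enhance_usps.py | replace_usps
-- ===== SOURCE A (Python) =====
-- def replace_usps(lines, bullets):
--     output = []
--     i = 0
--     while i < len(lines):
--         line = lines[i]
--         if line.startswith('## USPs'):
--             output.append('## USPs')
--             output.append('')
--             for bullet in bullets:
--                 output.append(f'- {bullet}')
--             output.append('')
--             # skip old USP lines
--             i += 1
--             while i < len(lines) and (lines[i].strip() == '' or lines[i].startswith('-')):
--                 i += 1
--             continue
--         output.append(line)
--         i += 1
--     return output
-- ===== SOURCE B (Python) =====
-- def replace_usps(lines, bullets):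
--     output = []
--     skipping = False
--     for line in lines:
--         if line.startswith('## USPs'):
--             output.append('## USPs')
--             output.append('')
--             for bullet in bullets:
--                 output.append(f'- {bullet}')
--             output.append('')
--             skipping = True
--         elif skipping and (line.strip() == '' or line.startswith('-')):
--             continue
--         else:
--             skipping = False
--             output.append(line)
--     return output
-- ===== Notes on version B (the rewrite author's own statement) =====
-- stated objective: simpler
-- what changed: Replaced A's index-driven while-loop with a nested inner skip-while by a single flat for-loop over the lines carrying a boolean skipping flag; the constant-factor speedup comes from direct iteration instead of repeated len(lines)/lines[i] indexing.
import Mathlib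
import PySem

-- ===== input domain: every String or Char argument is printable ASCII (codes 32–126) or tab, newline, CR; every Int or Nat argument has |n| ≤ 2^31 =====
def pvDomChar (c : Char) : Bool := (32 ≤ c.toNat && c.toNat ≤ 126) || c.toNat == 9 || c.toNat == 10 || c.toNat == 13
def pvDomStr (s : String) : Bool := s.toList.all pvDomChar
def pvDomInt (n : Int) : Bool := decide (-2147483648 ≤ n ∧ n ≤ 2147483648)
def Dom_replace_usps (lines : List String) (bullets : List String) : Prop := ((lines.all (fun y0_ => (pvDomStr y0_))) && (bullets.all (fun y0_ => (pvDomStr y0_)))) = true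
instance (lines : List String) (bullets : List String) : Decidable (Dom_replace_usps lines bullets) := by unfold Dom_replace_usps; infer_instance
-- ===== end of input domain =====

-- B replaces A's index loop with nested skip-while by one flat pass carrying a boolean
-- `skipping` flag (objective: simpler decomposition; same return value, same cost).

-- ===== PORT A =====
-- inner `while i < len(lines) and (lines[i].strip() == '' or lines[i].startswith('-')): i += 1`:
-- advancing the index over the remaining suffix
def pvSkipOld (rest : List String) : List String :=
  match rest with
  | [] => []
  | l :: t =>
    if (PySem.Str.strip l == "" || PySem.Str.startswith l "-") then pvSkipOld t else l :: t

lemma pvSkipOld_length_le (rest : List String) : (pvSkipOld rest).length ≤ rest.length := by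
  induction rest with
  | nil => simp [pvSkipOld]
  | cons l t ih =>
    rw [pvSkipOld]
    split
    · exact ih.trans (Nat.le_succ _)
    · exact Nat.le_refl _

-- outer `while i < len(lines)` as recursion on the suffix of lines from index i
def pvGoA (bullets : List String) (rest : List String) : List String :=
  match rest with
  | [] => []
  | line :: t =>
    if PySem.Str.startswith line "## USPs" then
      "## USPs" :: "" :: (bullets.map (fun b => "- " ++ b) ++ "" :: pvGoA bullets (pvSkipOld t))
    else
      line :: pvGoA bullets t
termination_by rest.length
decreasing_by
  · exact Nat.lt_succ_of_le (pvSkipOld_length_le t)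
  · exact Nat.lt_succ_self _

def replace_usps (lines : List String) (bullets : List String) : List String :=
  pvGoA bullets lines

-- ===== PORT B =====
-- one flat `for line in lines` loop with a `skipping` flag
def pvGoB (bullets : List String) (skipping : Bool) (rest : List String) : List String :=
  match rest with
  | [] => []
  | line :: t =>
    if PySem.Str.startswith line "## USPs" then
      "## USPs" :: "" :: (bullets.map (fun b => "- " ++ b) ++ "" :: pvGoB bullets true t)
    else if skipping && (PySem.Str.strip line == "" || PySem.Str.startswith line "-") then
      pvGoB bullets skipping t
    else
      line :: pvGoB bullets false t

def replace_usps_alt (lines : List String) (bullets : List String) : List String :=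
  pvGoB bullets false lines

-- ===== PRECONDITION & SPEC =====
def Spec_replace_usps (lines : List String) (bullets : List String) (out : List String) : Prop := out = replace_usps_alt lines bullets
instance (lines : List String) (bullets : List String) (out : List String) : Decidable (Spec_replace_usps lines bullets out) := by unfold Spec_replace_usps; infer_instance

-- ===== CLAIM (what is proved, stated in full; the proofs are below) =====
def Claim_equal_replace_usps : Prop := ∀ (lines : List String) (bullets : List String), Dom_replace_usps lines bullets → Spec_replace_usps lines bullets (replace_usps lines bullets)

-- ===== LEMMAS AND PROOFS =====

-- a '## USPs' header line is never dropped by the skip condition (its first char is '#')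
lemma pvHeader_facts (s : String) (h : PySem.Str.startswith s "## USPs" = true) :
    (PySem.Str.strip s == "" || PySem.Str.startswith s "-") = false := by
  simp only [PySem.Str.startswith, PySem.Chars.startswith, List.isPrefixOf_iff_prefix] at h
  obtain ⟨t, ht⟩ := h
  have hs : s.toList = '#' :: '#' :: ' ' :: 'U' :: 'S' :: 'P' :: 's' :: t := by
    rw [← ht]; rfl
  simp only [PySem.Str.strip, Bool.or_eq_false_iff]
  refine ⟨?_, ?_⟩
  · rw [beq_eq_false_iff_ne]
    intro he
    have h2 : PySem.Chars.strip s.toList = [] := by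
      have := congrArg String.toList he; simpa using this
    rw [hs, PySem.Chars.strip, PySem.Chars.lstrip] at h2
    rw [List.dropWhile_cons] at h2
    simp only [show PySem.Chars.isspace '#' = false by decide] at h2
    rw [PySem.Chars.rstrip, List.reverse_eq_nil_iff, List.dropWhile_eq_nil_iff] at h2
    exact absurd (h2 '#' (by simp)) (by decide)
  · simp [PySem.Chars.startswith, hs, List.isPrefixOf]

-- joint invariant: outside a skip region the two loops agree, and entering a skip
-- region (A's inner while vs B's flag) they agree too
lemma pvGoA_eq_pvGoB (bullets : List String) :
    ∀ (n : ℕ) (l : List String), l.length ≤ n →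
      pvGoA bullets l = pvGoB bullets false l ∧
      pvGoA bullets (pvSkipOld l) = pvGoB bullets true l := by
  intro n
  induction n with
  | zero =>
    intro l hl
    have : l = [] := List.eq_nil_of_length_eq_zero (Nat.le_zero.mp hl)
    subst this
    refine ⟨?_, ?_⟩ <;> simp [pvGoA, pvGoB, pvSkipOld]
  | succ n ih =>
    intro l hl
    match l with
    | [] => refine ⟨?_, ?_⟩ <;> simp [pvGoA, pvGoB, pvSkipOld]
    | line :: t =>
      have ht : t.length ≤ n := by simpa using Nat.lt_succ_iff.mp (Nat.lt_of_lt_of_le (by simp) hl)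
      obtain ⟨ih1, ih2⟩ := ih t ht
      by_cases hh : PySem.Str.startswith line "## USPs" = true
      · have hcond := pvHeader_facts line hh
        constructor
        · rw [pvGoA, pvGoB]
          simp only [hh, if_true, ih2]
        · rw [pvSkipOld]
          simp only [hcond, Bool.false_eq_true, if_false]
          rw [pvGoA, pvGoB]
          simp only [hh, if_true, ih2]
      · rw [Bool.not_eq_true] at hh
        by_cases hc : (PySem.Str.strip line == "" || PySem.Str.startswith line "-") = true
        · constructor
          · rw [pvGoA, pvGoB]
            simp only [hh, Bool.false_eq_true, if_false, Bool.false_and, ih1]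
          · rw [pvSkipOld]
            simp only [hc, if_true]
            rw [pvGoB]
            simp only [hh, Bool.false_eq_true, if_false, Bool.true_and, hc, if_true, ih2]
        · rw [Bool.not_eq_true] at hc
          constructor
          · rw [pvGoA, pvGoB]
            simp only [hh, Bool.false_eq_true, if_false, Bool.false_and, ih1]
          · rw [pvSkipOld]
            simp only [hc, Bool.false_eq_true, if_false]
            rw [pvGoA, pvGoB]
            simp only [hh, Bool.false_eq_true, if_false, Bool.true_and, hc, ih1]

-- ===== VERDICT (by name: the statement is the Claim_ definition above) =====
theorem replace_usps_spec : Claim_equal_replace_usps := by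
  intro lines bullets _
  unfold Spec_replace_usps replace_usps replace_usps_alt
  exact (pvGoA_eq_pvGoB bullets lines.length lines (Nat.le_refl _)).1
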